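-- pv_equiv track=rewrite | github.com/vishaal314/myapp | DataGuardian-Pro-Standalone-Source/services/compliance_score.py | _calculate_pii_detection_score
-- ===== SOURCE A (Python) =====
-- from typing import Dict, List, Any, Optional
--
-- def _calculate_pii_detection_score(scans: List[Dict[str, Any]]) -> int:
--     """Calculate PII detection factor score."""
--     if not scans:
--         return 0
--
--     # Based on coverage of different PII types
--     pii_types_found = set()
--     for scan in scans:
--         if 'pii_types' in scan:
--             pii_types_found.update(scan['pii_types'].keys())
--
--     # Common PII types that should be detected
--     common_pii_types = {
--         'email', 'phone', 'address', 'name', 'ip_address', 'credit_card',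
--         'ssn', 'passport', 'drivers_license', 'date_of_birth'
--     }
--
--     # Calculate coverage
--     coverage = len(pii_types_found.intersection(common_pii_types)) / len(common_pii_types)
--     return int(min(100, coverage * 100))
-- ===== SOURCE B (Python) =====
-- from typing import Dict, List, Any
--
-- _COMMON_PII_TYPES = [
--     'email', 'phone', 'address', 'name', 'ip_address', 'credit_card',
--     'ssn', 'passport', 'drivers_license', 'date_of_birth'
-- ]
--
-- def _calculate_pii_detection_score(scans: List[Dict[str, Any]]) -> int:
--     """Type-driven: count how many common PII types occur in at least one scan."""
--     count = sum(
--         1 for t in _COMMON_PII_TYPES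
--         if any('pii_types' in s and t in s['pii_types'] for s in scans)
--     )
--     return count * 10
-- ===== Notes on version B (the rewrite author's own statement) =====
-- stated objective: alternative
-- what changed: Reversed the traversal: instead of accumulating a set of all PII keys over the scans and intersecting it with the common-types set, B iterates over the fixed ten common PII types and counts those present in at least one scan, returning count*10 directly (no set, no intersection, no float arithmetic, no empty guard).
import Mathlib
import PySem

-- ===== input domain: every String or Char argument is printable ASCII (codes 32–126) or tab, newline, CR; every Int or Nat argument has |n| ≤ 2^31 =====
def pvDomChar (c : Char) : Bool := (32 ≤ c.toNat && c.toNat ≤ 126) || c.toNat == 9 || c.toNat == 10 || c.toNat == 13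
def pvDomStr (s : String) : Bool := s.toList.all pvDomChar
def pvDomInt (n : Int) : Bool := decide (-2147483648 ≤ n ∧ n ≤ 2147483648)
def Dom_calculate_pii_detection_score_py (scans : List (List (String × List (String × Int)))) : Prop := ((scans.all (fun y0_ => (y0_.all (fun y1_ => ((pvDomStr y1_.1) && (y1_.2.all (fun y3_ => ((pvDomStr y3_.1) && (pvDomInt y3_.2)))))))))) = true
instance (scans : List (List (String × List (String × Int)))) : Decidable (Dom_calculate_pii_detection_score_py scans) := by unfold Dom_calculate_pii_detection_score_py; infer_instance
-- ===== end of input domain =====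

-- B replaces A's scan-driven set accumulation + intersection by a type-driven count
-- over the fixed common PII list (alternative decomposition; same cost class).

-- ===== PORT A =====
-- the ten common PII types, as Python's set literal
def pvCommonPiiSet : PySem.Set String :=
  PySem.Set.ofList ["email", "phone", "address", "name", "ip_address", "credit_card",
    "ssn", "passport", "drivers_license", "date_of_birth"]

def calculate_pii_detection_score_py (scans : List (List (String × List (String × Int)))) : Int :=
  if scans = [] then 0
  else
    -- for scan in scans: if 'pii_types' in scan: pii_types_found.update(scan['pii_types'].keys())
    let pii_types_found : PySem.Set String :=
      scans.foldl (fun acc scan =>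
        match PySem.Dict.get? (PySem.Dict.mk scan) "pii_types" with
        | some d => PySem.Set.update acc (PySem.Dict.keys (PySem.Dict.mk d))
        | none => acc) PySem.Set.empty
    -- coverage = len(found & common) / 10; return int(min(100, coverage * 100)).
    -- Exact integer rendering of the float step: for every k = len(found & common) ∈ 0..10,
    -- int(min(100, (k/10)*100)) equals k*10 in Python's float arithmetic (checked for all k).
    let k : Int := (PySem.Set.inter pii_types_found pvCommonPiiSet).length
    min 100 (k * 10)

-- ===== PORT B =====
def pvCommonPiiList : List String :=
  ["email", "phone", "address", "name", "ip_address", "credit_card",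
   "ssn", "passport", "drivers_license", "date_of_birth"]

-- any('pii_types' in s and t in s['pii_types'] for s in scans)
def pvTypeFound (scans : List (List (String × List (String × Int)))) (t : String) : Bool :=
  scans.any (fun scan =>
    match PySem.Dict.get? (PySem.Dict.mk scan) "pii_types" with
    | some d => PySem.Dict.contains (PySem.Dict.mk d) t
    | none => false)

def calculate_pii_detection_score_py_alt (scans : List (List (String × List (String × Int)))) : Int :=
  let count : Int :=
    pvCommonPiiList.foldl (fun c t => if pvTypeFound scans t then c + 1 else c) 0
  count * 10

-- ===== PRECONDITION & SPEC =====
def Spec_calculate_pii_detection_score_py (scans : List (List (String × List (String × Int)))) (out : Int) : Prop := out = calculate_pii_detection_score_py_alt scans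
instance (scans : List (List (String × List (String × Int)))) (out : Int) : Decidable (Spec_calculate_pii_detection_score_py scans out) := by unfold Spec_calculate_pii_detection_score_py; infer_instance

-- ===== CLAIM (what is proved, stated in full; the proofs are below) =====
def Claim_equal_calculate_pii_detection_score_py : Prop := ∀ (scans : List (List (String × List (String × Int)))), Dom_calculate_pii_detection_score_py scans → Spec_calculate_pii_detection_score_py scans (calculate_pii_detection_score_py scans)

-- ===== LEMMAS AND PROOFS =====

-- counting loop = length of the filtered list
lemma pv_foldl_count {α : Type} (p : α → Bool) (l : List α) (c : Int) :
    l.foldl (fun c t => if p t then c + 1 else c) c = c + (l.filter p).length := by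
  induction l generalizing c with
  | nil => simp
  | cons x xs ih =>
    by_cases h : p x <;> simp [List.foldl, h, ih] <;> omega

-- membership in A's accumulated set ↔ B's presence test
lemma pv_mem_found (scans : List (List (String × List (String × Int)))) (t : String)
    (acc : PySem.Set String) :
    (t ∈ scans.foldl (fun acc scan =>
        match PySem.Dict.get? (PySem.Dict.mk scan) "pii_types" with
        | some d => PySem.Set.update acc (PySem.Dict.keys (PySem.Dict.mk d))
        | none => acc) acc) ↔ (t ∈ acc ∨ pvTypeFound scans t = true) := by
  induction scans generalizing acc with
  | nil => simp [pvTypeFound]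
  | cons s rest ih =>
    simp only [List.foldl, pvTypeFound, List.any_cons, Bool.or_eq_true]
    cases h : PySem.Dict.get? (PySem.Dict.mk s) "pii_types" with
    | none =>
      rw [ih]
      simp [pvTypeFound]
    | some d =>
      rw [ih]
      simp only [PySem.Set.mem_update]
      simp [pvTypeFound]
      tauto

-- A's set stays duplicate-free
lemma pv_found_nodup (scans : List (List (String × List (String × Int))))
    (acc : PySem.Set String) (h : acc.Nodup) :
    (scans.foldl (fun acc scan =>
        match PySem.Dict.get? (PySem.Dict.mk scan) "pii_types" with
        | some d => PySem.Set.update acc (PySem.Dict.keys (PySem.Dict.mk d))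
        | none => acc) acc).Nodup := by
  induction scans generalizing acc with
  | nil => exact h
  | cons s rest ih =>
    simp only [List.foldl]
    cases PySem.Dict.get? (PySem.Dict.mk s) "pii_types" with
    | none => exact ih acc h
    | some d => exact ih _ (PySem.Set.nodup_update _ _ h)

-- |a ∩ b| counted from b's side, for duplicate-free a and b
lemma pv_length_inter (a b : List String) (ha : a.Nodup) (hb : b.Nodup) :
    (PySem.Set.inter a b).length = (b.filter (fun x => decide (x ∈ a))).length := by
  apply List.Perm.length_eq
  apply (List.perm_ext_iff_of_nodup (PySem.Set.nodup_inter _ _ ha) (hb.filter _)).mpr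
  intro x
  simp [PySem.Set.mem_inter, List.mem_filter, and_comm]

-- ===== VERDICT (by name: the statement is the Claim_ definition above) =====
theorem calculate_pii_detection_score_py_spec : Claim_equal_calculate_pii_detection_score_py := by
  intro scans _
  unfold Spec_calculate_pii_detection_score_py
  unfold calculate_pii_detection_score_py calculate_pii_detection_score_py_alt
  rw [pv_foldl_count]
  by_cases hempty : scans = []
  · subst hempty
    simp [pvTypeFound]
  · simp only [if_neg hempty]
    have hnod := pv_found_nodup scans PySem.Set.empty (by simp [PySem.Set.empty])
    rw [pv_length_inter _ _ hnod (by unfold pvCommonPiiSet; exact PySem.Set.nodup_ofList _)]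
    have hfilter : (pvCommonPiiSet.filter
        (fun x => decide (x ∈ scans.foldl (fun acc scan =>
          match PySem.Dict.get? (PySem.Dict.mk scan) "pii_types" with
          | some d => PySem.Set.update acc (PySem.Dict.keys (PySem.Dict.mk d))
          | none => acc) PySem.Set.empty)))
        = pvCommonPiiList.filter (pvTypeFound scans) := by
      have hset : pvCommonPiiSet = pvCommonPiiList := by decide
      rw [hset]
      apply List.filter_congr
      intro x _
      have hmem : x ∈ scans.foldl (fun acc scan =>
          match PySem.Dict.get? (PySem.Dict.mk scan) "pii_types" with
          | some d => PySem.Set.update acc (PySem.Dict.keys (PySem.Dict.mk d))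
          | none => acc) PySem.Set.empty ↔ pvTypeFound scans x = true := by
        rw [pv_mem_found]
        simp [PySem.Set.empty]
      rw [Bool.eq_iff_iff, decide_eq_true_iff]
      exact hmem
    rw [hfilter]
    have hle : (pvCommonPiiList.filter (pvTypeFound scans)).length ≤ 10 := by
      have := List.length_filter_le (pvTypeFound scans) pvCommonPiiList
      simpa [pvCommonPiiList] using this
    omega
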